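-- pv_equiv track=rewrite | github.com/karstenj/advent-of-code | 2023/day20/aoc_part_2.py | get_conjunctions
-- ===== SOURCE A (Python) =====
-- def get_conjunctions(search, elements):
--     conjunctions = []
--     for e in elements:
--         if search in elements[e]['dest']:
--             conjunctions.append(e)
--     if len(conjunctions) == 1:
--         conjunctions = get_conjunctions(conjunctions[0], elements)
--     return conjunctions
-- ===== SOURCE B (Python) =====
-- def get_conjunctions(search, elements):
--     # Build a reverse index (destination -> list of sources) once, then follow
--     # single-predecessor chains with an iterative loop instead of recursion.
--     preds = {}
--     for e in elements:
--         for d in dict.fromkeys(elements[e]['dest']):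
--             preds.setdefault(d, []).append(e)
--     while True:
--         conjunctions = preds.get(search, [])
--         if len(conjunctions) != 1:
--             return conjunctions
--         search = conjunctions[0]
-- ===== Notes on version B (the rewrite author's own statement) =====
-- stated objective: alternative
-- what changed: Replaces A's recursion that rescans all elements at every chain level with a reverse index (destination -> sources) built once plus an iterative while-loop following the single-predecessor chain.
import Mathlib
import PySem

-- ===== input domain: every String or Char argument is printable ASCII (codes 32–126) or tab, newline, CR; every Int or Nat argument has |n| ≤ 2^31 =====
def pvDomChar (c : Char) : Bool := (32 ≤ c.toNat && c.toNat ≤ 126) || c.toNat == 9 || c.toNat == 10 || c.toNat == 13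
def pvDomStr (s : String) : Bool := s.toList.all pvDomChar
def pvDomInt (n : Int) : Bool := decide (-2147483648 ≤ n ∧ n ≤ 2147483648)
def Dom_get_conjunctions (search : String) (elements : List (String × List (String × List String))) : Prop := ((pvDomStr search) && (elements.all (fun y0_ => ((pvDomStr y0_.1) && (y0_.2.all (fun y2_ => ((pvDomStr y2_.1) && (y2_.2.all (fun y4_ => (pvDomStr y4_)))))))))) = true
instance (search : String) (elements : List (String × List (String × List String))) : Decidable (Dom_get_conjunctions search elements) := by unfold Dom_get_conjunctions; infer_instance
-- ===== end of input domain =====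

-- B replaces A's rescan-per-level recursion by a reverse index (dest -> sources) built
-- once plus an iterative chain-following loop; equivalence of RETURN values is proved.

-- ===== PORT A =====
-- first-match association-list lookup = Python dict lookup under the dict->assoc-list convention
def pvLookup1 {α : Type} (l : List (String × α)) (k : String) : Option α :=
  (l.find? (fun p => p.1 == k)).map (·.2)

-- elements[e]['dest'] ; the [] default is only reached where Python raises KeyError (excluded by Pre_)
def pvDest (elements : List (String × List (String × List String))) (k : String) : List String :=
  match pvLookup1 elements k with
  | some v => (pvLookup1 v "dest").getD []
  | none => []

-- A's recursion, fueled: A recurses at most elements.length + 1 times on every input on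
-- which the Python terminates (each recursive search is a distinct key), so the fuel is
-- never exhausted inside Pre_; outside Pre_ the Python diverges or raises.
def get_conjunctionsGo (fuel : Nat) (search : String)
    (elements : List (String × List (String × List String))) : List String :=
  match fuel with
  | 0 => []
  | fuel + 1 =>
    let conjunctions := elements.foldl
      (fun acc p => if (pvDest elements p.1).contains search then acc ++ [p.1] else acc) []
    if conjunctions.length = 1 then
      get_conjunctionsGo fuel (PySem.List.pyGetD conjunctions 0 "") elements
    else conjunctions

def get_conjunctions (search : String) (elements : List (String × List (String × List String))) : List String :=
  get_conjunctionsGo (elements.length + 1) search elements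

-- ===== PORT B =====
-- preds.setdefault(d, []).append(e) over dict.fromkeys(elements[e]['dest'])
def pvBuildPreds (elements : List (String × List (String × List String))) :
    PySem.Dict String (List String) :=
  elements.foldl
    (fun m p => (PySem.List.dedup (pvDest elements p.1)).foldl
      (fun m d => m.modify d [] (fun l => l ++ [p.1])) m)
    PySem.Dict.empty

-- the while-True loop, fueled with the same bound (the loop runs at most
-- elements.length + 1 iterations whenever the Python loop terminates)
def get_conjunctions_altLoop (fuel : Nat) (search : String)
    (preds : PySem.Dict String (List String)) : List String :=
  match fuel with
  | 0 => []
  | fuel + 1 =>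
    let conjunctions := preds.getD search []
    if conjunctions.length ≠ 1 then conjunctions
    else get_conjunctions_altLoop fuel (PySem.List.pyGetD conjunctions 0 "") preds

def get_conjunctions_alt (search : String) (elements : List (String × List (String × List String))) : List String :=
  get_conjunctions_altLoop (elements.length + 1) search (pvBuildPreds elements)

-- ===== PRECONDITION & SPEC =====
-- the predecessor list of a (A's per-level scan result, as a graph notion)
def pvPredList (elements : List (String × List (String × List String))) (a : String) : List String :=
  (elements.filter (fun p => (pvDest elements p.1).contains a)).map (·.1)

-- the chain step: from a the search moves to b iff b is a's unique predecessor occurrence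
def pvStep (elements : List (String × List (String × List String))) (a b : String) : Bool :=
  pvPredList elements a == [b]

-- reachability in 1..n+1 chain steps
def pvReach (elements : List (String × List (String × List String))) :
    Nat → String → String → Bool
  | 0, a, b => pvStep elements a b
  | n + 1, a, b => pvStep elements a b ||
      (elements.map (·.1)).any (fun c => pvStep elements a c && pvReach elements n c b)

-- Pre_ excludes exactly (i) inputs where some key's first-match value has no "dest" entry
-- (Python A raises KeyError there) and (ii) inputs whose single-predecessor chain from
-- search runs into a cycle, on which Python A recurses forever (no return value).
def Pre_get_conjunctions (search : String) (elements : List (String × List (String × List String))) : Prop :=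
  (∀ p ∈ elements, ((pvLookup1 elements p.1).bind (fun v => pvLookup1 v "dest")).isSome) ∧
  (∀ k ∈ elements.map (·.1),
    ¬(pvReach elements elements.length search k = true ∧
      pvReach elements elements.length k k = true))

instance (search : String) (elements : List (String × List (String × List String))) : Decidable (Pre_get_conjunctions search elements) := by unfold Pre_get_conjunctions; infer_instance

def pvWitness_get_conjunctions : String × (List (String × List (String × List String))) :=
  ("a", [("b", [("dest", ["a"])])])

def Spec_get_conjunctions (search : String) (elements : List (String × List (String × List String))) (out : List String) : Prop := out = get_conjunctions_alt search elements
instance (search : String) (elements : List (String × List (String × List String))) (out : List String) : Decidable (Spec_get_conjunctions search elements out) := by unfold Spec_get_conjunctions; infer_instance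

-- ===== CLAIM (what is proved, stated in full; the proofs are below) =====
def Claim_equal_get_conjunctions : Prop := ∀ (search : String) (elements : List (String × List (String × List String))), Dom_get_conjunctions search elements → Pre_get_conjunctions search elements → Spec_get_conjunctions search elements (get_conjunctions search elements)

-- ===== LEMMAS AND PROOFS =====

-- one inner pass: appending e under every distinct destination d
lemma getD_inner_foldl (ds : List String) (hnd : ds.Nodup) (e : String)
    (m : PySem.Dict String (List String)) (s : String) :
    (ds.foldl (fun m d => m.modify d [] (fun l => l ++ [e])) m).getD s []
      = m.getD s [] ++ (if s ∈ ds then [e] else []) := by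
  induction ds generalizing m with
  | nil => simp
  | cons d ds ih =>
    have hd : d ∉ ds := (List.nodup_cons.mp hnd).1
    rw [List.foldl_cons, ih (List.nodup_cons.mp hnd).2]
    rw [PySem.Dict.getD_modify]
    by_cases hs : s = d
    · subst hs
      simp [hd]
    · simp [hs, List.mem_cons]

-- the built dict read at s is exactly A's scan result for search = s
lemma getD_buildPreds_from (E l : List (String × List (String × List String)))
    (m : PySem.Dict String (List String)) (s : String) :
    (l.foldl (fun m p => (PySem.List.dedup (pvDest E p.1)).foldl
        (fun m d => m.modify d [] (fun l => l ++ [p.1])) m) m).getD s []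
      = m.getD s [] ++ (l.filter (fun p => (pvDest E p.1).contains s)).map (·.1) := by
  induction l generalizing m with
  | nil => simp
  | cons p l ih =>
    rw [List.foldl_cons, ih]
    rw [getD_inner_foldl _ (PySem.List.nodup_dedup _) _ m s]
    by_cases hmem : s ∈ pvDest E p.1
    · have : (pvDest E p.1).contains s = true := by simpa using hmem
      simp [hmem]
    · have : (pvDest E p.1).contains s = false := by simpa using hmem
      simp [hmem]

lemma getD_buildPreds (E : List (String × List (String × List String))) (s : String) :
    (pvBuildPreds E).getD s []
      = (E.filter (fun p => (pvDest E p.1).contains s)).map (·.1) := by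
  unfold pvBuildPreds
  rw [getD_buildPreds_from E E PySem.Dict.empty s]
  simp

-- the two fueled loops agree for every fuel and start
lemma go_eq_altLoop (E : List (String × List (String × List String))) :
    ∀ (fuel : Nat) (s : String),
      get_conjunctionsGo fuel s E = get_conjunctions_altLoop fuel s (pvBuildPreds E) := by
  intro fuel
  induction fuel with
  | zero => intro s; rfl
  | succ n ih =>
    intro s
    rw [get_conjunctionsGo, get_conjunctions_altLoop]
    have hconj : E.foldl
        (fun acc p => if (pvDest E p.1).contains s then acc ++ [p.1] else acc) []
        = (pvBuildPreds E).getD s [] := by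
      rw [PySem.List.foldl_append_if (fun p => (pvDest E p.1).contains s) (·.1) E []]
      rw [getD_buildPreds]
      simp
    simp only [hconj]
    by_cases hlen : ((pvBuildPreds E).getD s []).length = 1
    · simp [hlen, ih]
    · simp [hlen]

-- ===== VERDICT (by name: the statement is the Claim_ definition above) =====
theorem get_conjunctions_spec : Claim_equal_get_conjunctions := by
  intro search elements _ _
  unfold Spec_get_conjunctions get_conjunctions get_conjunctions_alt
  exact go_eq_altLoop elements (elements.length + 1) search
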